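-- pv_equiv track=rewrite | github.com/ninepig/leecode_dd_2024 | zAmazon/oa/zmethodExplained/amazonDistinctPassword.py | countBurtalWay
-- ===== SOURCE A (Python) =====
-- def countBurtalWay(password:str)-> int:
--     dis_password = set()
--     dis_password.add(password)
--     for i in range(len(password)):
--         for j in range(i + 1 ,len(password)):
--             replace_string = password[i:j+1]
--             replace_string_Rev = replace_string[::-1]
--             new_pass = password[:i] + replace_string_Rev + password[j+1:]
--             dis_password.add(new_pass)
--
--     return len(dis_password)
-- ===== SOURCE B (Python) =====
-- def countBurtalWay(password: str) -> int:
--     # Each reversal result is determined by its "core" pair (i, j), i < j with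
--     # password[i] != password[j] (shrink equal endpoints); distinct core pairs give
--     # distinct strings, an empty core gives the original.  So the answer is
--     # 1 + #{(i, j) : i < j, password[i] != password[j]}.
--     n = len(password)
--     diff = 0
--     for i in range(n):
--         for j in range(i + 1, n):
--             if password[i] != password[j]:
--                 diff += 1
--     return 1 + diff
-- ===== Notes on version B (the rewrite author's own statement) =====
-- stated objective: faster
-- what changed: Instead of materializing every substring-reversal result and deduplicating them in a set, B counts index pairs i<j with password[i] != password[j] (the canonical cores of the reversals, each giving a distinct string) and returns 1 + that count.
import Mathlib
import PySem

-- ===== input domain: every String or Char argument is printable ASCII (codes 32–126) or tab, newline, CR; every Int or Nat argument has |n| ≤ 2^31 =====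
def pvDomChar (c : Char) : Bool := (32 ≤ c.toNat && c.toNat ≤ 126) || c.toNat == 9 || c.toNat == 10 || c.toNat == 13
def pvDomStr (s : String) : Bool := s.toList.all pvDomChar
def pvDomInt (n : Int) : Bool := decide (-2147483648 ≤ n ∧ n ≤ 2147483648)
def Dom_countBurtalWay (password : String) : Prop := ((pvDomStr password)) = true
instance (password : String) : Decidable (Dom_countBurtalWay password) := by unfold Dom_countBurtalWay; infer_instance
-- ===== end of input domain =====

-- B replaces A's set of all substring-reversal results by counting the index pairs i < j
-- with password[i] != password[j] (the canonical cores of the reversals); measured faster.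

-- ===== PORT A =====
def countBurtalWay (password : String) : Int :=
  let s := password.toList
  let dis0 : PySem.Set (List Char) := PySem.Set.add PySem.Set.empty s
  let n : Int := PySem.List.len s
  let dis := (PySem.List.pyRange 0 n 1).foldl (fun dis i =>
    (PySem.List.pyRange (i + 1) n 1).foldl (fun dis j =>
      let replaceString := PySem.List.slice s (some i) (some (j + 1))
      let replaceStringRev := (PySem.List.slice? replaceString none none (-1)).getD []
      let newPass := PySem.List.slice s none (some i) ++ replaceStringRev ++
        PySem.List.slice s (some (j + 1)) none
      PySem.Set.add dis newPass) dis) dis0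
  PySem.Set.len dis

-- ===== PORT B =====
def countBurtalWay_alt (password : String) : Int :=
  let s := password.toList
  let n : Int := PySem.List.len s
  let diff := (PySem.List.pyRange 0 n 1).foldl (fun diff i =>
    (PySem.List.pyRange (i + 1) n 1).foldl (fun diff j =>
      if PySem.List.pyGetD s i ' ' ≠ PySem.List.pyGetD s j ' ' then diff + 1 else diff) diff) 0
  1 + diff

-- ===== PRECONDITION & SPEC =====
def Spec_countBurtalWay (password : String) (out : Int) : Prop := out = countBurtalWay_alt password
instance (password : String) (out : Int) : Decidable (Spec_countBurtalWay password out) := by unfold Spec_countBurtalWay; infer_instance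

-- ===== CLAIM (what is proved, stated in full; the proofs are below) =====
def Claim_equal_countBurtalWay : Prop := ∀ (password : String), Dom_countBurtalWay password → Spec_countBurtalWay password (countBurtalWay password)

-- ===== LEMMAS AND PROOFS =====

-- the reversal of s[i..j] inside l (Nat indices)
def revN (l : List Char) (i j : Nat) : List Char :=
  l.take i ++ ((l.drop i).take (j + 1 - i)).reverse ++ l.drop (j + 1)

-- the index pairs (i, j), i < j < n, in generation order
def pairsN (n : Nat) : List (Nat × Nat) :=
  (List.range n).flatMap (fun i => (List.range (n - (i + 1))).map (fun k => (i, i + 1 + k)))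

-- "core" pairs: the two endpoint characters differ
def goodP (l : List Char) (p : Nat × Nat) : Bool := decide (l.getD p.1 ' ' ≠ l.getD p.2 ' ')

theorem length_revN {l : List Char} {i j : Nat} (hj : j < l.length) (hij : i ≤ j) :
    (revN l i j).length = l.length := by
  simp [revN]; omega

theorem getD_revN {l : List Char} {i j k : Nat} (hj : j < l.length) (hij : i ≤ j) :
    (revN l i j).getD k ' ' =
      if k < i then l.getD k ' ' else if k ≤ j then l.getD (i + j - k) ' ' else l.getD k ' ' := by
  have hi : i < l.length := by omega
  have hmid : ((l.drop i).take (j + 1 - i)).length = j + 1 - i := by simp; omega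
  unfold revN
  rcases Nat.lt_or_ge k i with hk | hk
  · rw [List.append_assoc, List.getD_append _ _ _ k (by simp; omega)]
    rw [List.getD_eq_getElem _ _ (by simp; omega), List.getElem_take,
      List.getD_eq_getElem _ _ (by omega), if_pos hk]
  · rcases Nat.lt_or_ge j k with hkj | hkj
    · rw [List.getD_append_right _ _ _ k (by simp; omega)]
      simp only [List.length_append, List.length_take, List.length_reverse, hmid]
      rw [if_neg (by omega), if_neg (by omega)]
      rcases Nat.lt_or_ge k l.length with hkl | hkl
      · rw [List.getD_eq_getElem _ _ (by simp; omega), List.getElem_drop,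
          List.getD_eq_getElem _ _ hkl]
        congr 1; omega
      · rw [List.getD_eq_default _ _ (by simp; omega), List.getD_eq_default _ _ (by omega)]
    · rw [List.append_assoc, List.getD_append_right _ _ _ k (by simp; omega),
        List.getD_append _ _ _ _ (by simp; omega)]
      have hlt : k - (l.take i).length < ((l.drop i).take (j + 1 - i)).reverse.length := by
        simp; omega
      rw [List.getD_eq_getElem _ _ hlt, List.getElem_reverse, List.getElem_take, List.getElem_drop]
      rw [if_neg (by omega), if_pos (by omega), List.getD_eq_getElem _ _ (by omega)]
      congr 1
      simp only [List.length_reverse, List.length_take, hmid] at *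
      omega

theorem ext_getD {l1 l2 : List Char} (hlen : l1.length = l2.length)
    (h : ∀ k, k < l1.length → l1.getD k ' ' = l2.getD k ' ') : l1 = l2 :=
  List.ext_getElem hlen (fun k h1 h2 => by
    rw [← List.getD_eq_getElem _ ' ' h1, ← List.getD_eq_getElem _ ' ' h2]; exact h k h1)

theorem revN_self {l : List Char} {i j : Nat} (hj : j < l.length) (hij : i ≤ j)
    (hpal : ∀ k, i ≤ k → k ≤ j → l.getD (i + j - k) ' ' = l.getD k ' ') : revN l i j = l := by
  refine ext_getD (length_revN hj hij) ?_
  intro k hk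
  rw [getD_revN hj hij]
  split_ifs with h1 h2
  · rfl
  · exact hpal k (by omega) h2
  · rfl

theorem revN_shrink {l : List Char} {i j : Nat} (hij : i + 1 < j) (hj : j < l.length)
    (heq : l.getD i ' ' = l.getD j ' ') : revN l i j = revN l (i + 1) (j - 1) := by
  refine ext_getD (by rw [length_revN hj (by omega), length_revN (by omega) (by omega)]) ?_
  intro k hk
  rw [length_revN hj (by omega)] at hk
  rw [getD_revN hj (by omega), getD_revN (by omega) (by omega)]
  by_cases c1 : k < i
  · rw [if_pos c1, if_pos (by omega : k < i + 1)]
  by_cases c2 : k = i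
  · subst c2
    rw [if_neg c1, if_pos (by omega : k ≤ j), if_pos (by omega : k < k + 1),
      show k + j - k = j by omega]
    exact heq.symm
  by_cases c3 : k ≤ j - 1
  · rw [if_neg c1, if_pos (by omega : k ≤ j), if_neg (by omega : ¬ k < i + 1), if_pos c3]
    congr 1
    omega
  by_cases c4 : k = j
  · subst c4
    rw [if_neg c1, if_pos le_rfl, if_neg (by omega : ¬ k < i + 1), if_neg c3,
      show i + k - k = i by omega]
    exact heq
  · rw [if_neg c1, if_neg (by omega : ¬ k ≤ j), if_neg (by omega : ¬ k < i + 1), if_neg c3]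
theorem revN_ne {l : List Char} {i j : Nat} (hij : i < j) (hj : j < l.length)
    (hne : l.getD i ' ' ≠ l.getD j ' ') : revN l i j ≠ l := by
  intro h
  have := congrArg (fun t => List.getD t i ' ') h
  simp only at this
  rw [getD_revN hj (by omega)] at this
  rw [if_neg (by omega), if_pos (by omega), show i + j - i = j by omega] at this
  exact hne this.symm

theorem revN_inj {l : List Char} {i j i' j' : Nat} (hij : i < j) (hj : j < l.length)
    (hij' : i' < j') (hj' : j' < l.length)
    (hne : l.getD i ' ' ≠ l.getD j ' ') (hne' : l.getD i' ' ' ≠ l.getD j' ' ')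
    (hpq : (i, j) ≠ (i', j')) : revN l i j ≠ revN l i' j' := by
  intro h
  have hget : ∀ k, (revN l i j).getD k ' ' = (revN l i' j').getD k ' ' := fun k => by rw [h]
  rcases Nat.lt_or_ge i i' with hii | hii
  · have := hget i
    rw [getD_revN hj (by omega), getD_revN hj' (by omega)] at this
    rw [if_neg (by omega), if_pos (by omega), if_pos hii, show i + j - i = j by omega] at this
    exact hne this.symm
  · rcases Nat.lt_or_ge i' i with hii' | hii'
    · have := hget i'
      rw [getD_revN hj (by omega), getD_revN hj' (by omega)] at this
      rw [if_pos hii', if_neg (by omega), if_pos (by omega), show i' + j' - i' = j' by omega] at this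
      exact hne' this
    · have hii0 : i = i' := by omega
      subst hii0
      rcases Nat.lt_or_ge j j' with hjj | hjj
      · have := hget j'
        rw [getD_revN hj (by omega), getD_revN hj' (by omega)] at this
        rw [if_neg (by omega), if_neg (by omega), if_neg (by omega), if_pos (by omega),
          show i + j' - j' = i by omega] at this
        exact hne' this.symm
      · have hne_jj : j ≠ j' := fun hh => hpq (by rw [hh])
        have hjj' : j' < j := by omega
        have := hget j
        rw [getD_revN hj (by omega), getD_revN hj' (by omega)] at this
        rw [if_neg (by omega), if_pos (by omega), if_neg (by omega), if_neg (by omega),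
          show i + j - j = i by omega] at this
        exact hne this

theorem revN_core {l : List Char} (d : Nat) :
    ∀ i j, i ≤ j → j < l.length → j - i ≤ d →
      revN l i j = l ∨ ∃ a b, i ≤ a ∧ a < b ∧ b ≤ j ∧ l.getD a ' ' ≠ l.getD b ' ' ∧
        revN l i j = revN l a b := by
  induction d with
  | zero =>
    intro i j hij hj hd
    have : i = j := by omega
    subst this
    left
    exact revN_self hj le_rfl (fun k h1 h2 => by congr 1; omega)
  | succ d ih =>
    intro i j hij hj hd
    by_cases heq : l.getD i ' ' = l.getD j ' '
    · rcases Nat.lt_or_ge (i + 1) j with hlt | hge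
      · rcases ih (i + 1) (j - 1) (by omega) (by omega) (by omega) with h | ⟨a, b, h1, h2, h3, h4, h5⟩
        · left; rw [revN_shrink hlt hj heq]; exact h
        · right; exact ⟨a, b, by omega, h2, by omega, h4, by rw [revN_shrink hlt hj heq]; exact h5⟩
      · -- j = i or j = i + 1, endpoints equal: revN = l
        left
        refine revN_self hj hij (fun k h1 h2 => ?_)
        rcases Nat.lt_or_ge i j with h3 | h3
        · have : j = i + 1 := by omega
          subst this
          rcases Nat.lt_or_ge k (i+1) with h4 | h4
          · rw [show i + (i+1) - k = i + 1 by omega]; rw [show k = i by omega]; exact heq.symm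
          · rw [show i + (i+1) - k = i by omega, show k = i + 1 by omega]; exact heq
        · congr 1; omega
    · right
      rcases Nat.lt_or_ge i j with h3 | h3
      · exact ⟨i, j, le_rfl, h3, le_rfl, heq, rfl⟩
      · exact absurd (by congr 1; omega : l.getD i ' ' = l.getD j ' ') heq

theorem mem_pairsN {n : Nat} {p : Nat × Nat} : p ∈ pairsN n ↔ p.1 < p.2 ∧ p.2 < n := by
  obtain ⟨i, j⟩ := p
  simp only [pairsN, List.mem_flatMap, List.mem_map, List.mem_range, Prod.mk.injEq]
  constructor
  · rintro ⟨a, ha, k, hk, rfl, rfl⟩; omega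
  · rintro ⟨h1, h2⟩; exact ⟨i, by omega, j - (i+1), by omega, rfl, by omega⟩

theorem nodup_pairsN (n : Nat) : (pairsN n).Nodup := by
  unfold pairsN
  rw [List.nodup_flatMap]
  refine ⟨fun i _ => List.Nodup.map ?_ List.nodup_range, ?_⟩
  · intro a b h
    have := congrArg Prod.snd h
    simp only at this; omega
  · refine List.Pairwise.imp ?_ (List.pairwise_lt_range)
    intro a b hab x hxa hxb
    simp only [List.mem_map, List.mem_range] at hxa hxb
    obtain ⟨k, _, rfl⟩ := hxa
    obtain ⟨k', _, h⟩ := hxb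
    have := congrArg Prod.fst h
    simp only at this; omega

theorem foldl_if_count {α : Type} (q : α → Prop) [DecidablePred q] :
    ∀ (xs : List α) (a : Int),
      xs.foldl (fun acc x => if q x then acc + 1 else acc) a
        = a + ((xs.countP (fun x => decide (q x)) : Nat) : Int) := by
  intro xs
  induction xs with
  | nil => intro a; simp
  | cons x xs ih =>
    intro a
    by_cases h : q x
    · simp only [List.foldl_cons, ih, List.countP_cons, h]
      simp; omega
    · simp only [List.foldl_cons, if_neg h, ih, List.countP_cons]
      simp [h]

theorem foldl_addf {α : Type} (c : α → Nat) :
    ∀ (xs : List α) (a : Int),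
      xs.foldl (fun acc x => acc + ((c x : Nat) : Int)) a = a + ((xs.map c).sum : Int) := by
  intro xs
  induction xs with
  | nil => intro a; simp
  | cons x xs ih => intro a; simp only [List.foldl_cons, ih, List.map_cons, List.sum_cons]; push_cast; ring

theorem portB_eq (p : String) :
    countBurtalWay_alt p = 1 + (((pairsN p.toList.length).filter (goodP p.toList)).length : Int) := by
  show 1 + _ = _
  generalize p.toList = l
  congr 1
  rw [← List.countP_eq_length_filter]
  -- LHS: outer fold
  have hn : PySem.List.len l = (l.length : Int) := by simp [PySem.List.len]
  rw [hn, PySem.List.pyRange_one 0 (l.length : Int)]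
  simp only [Int.sub_zero, Int.toNat_natCast, List.foldl_map]
  have hbody : (fun (diff : Int) (k : Nat) =>
      (PySem.List.pyRange ((0 : Int) + (k : Int) + 1) (l.length : Int) 1).foldl
        (fun diff j => if PySem.List.pyGetD l ((0 : Int) + (k : Int)) ' ' ≠ PySem.List.pyGetD l j ' ' then diff + 1 else diff) diff)
      = (fun (diff : Int) (k : Nat) =>
          diff + (((List.range (l.length - (k + 1))).countP
            (fun m => goodP l (k, k + 1 + m)) : Nat) : Int)) := by
    funext diff k
    rw [PySem.List.pyRange_one]
    have ht : ((l.length : Int) - ((0 : Int) + (k : Int) + 1)).toNat = l.length - (k + 1) := by omega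
    rw [ht, List.foldl_map]
    have : (fun (diff : Int) (m : Nat) =>
        if PySem.List.pyGetD l ((0:Int) + (k:Int)) ' ' ≠ PySem.List.pyGetD l ((0:Int) + (k:Int) + 1 + (m:Int)) ' ' then diff + 1 else diff)
        = (fun (diff : Int) (m : Nat) => if l.getD k ' ' ≠ l.getD (k + 1 + m) ' ' then diff + 1 else diff) := by
      funext diff m
      have h1 : (0:Int) + (k:Int) = ((k : Nat) : Int) := by ring
      have h2 : (k:Int) + 1 + (m:Int) = (((k + 1 + m : Nat)) : Int) := by push_cast; ring
      rw [h1, h2, PySem.List.pyGetD_natCast, PySem.List.pyGetD_natCast]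
    rw [this, foldl_if_count (fun m => l.getD k ' ' ≠ l.getD (k + 1 + m) ' ')]
    rfl
  rw [hbody, foldl_addf (fun k => (List.range (l.length - (k + 1))).countP (fun m => goodP l (k, k + 1 + m)))]
  -- RHS: countP over pairsN
  rw [pairsN, List.countP_flatMap]
  simp only [Function.comp_def, List.countP_map]
  norm_num

theorem foldl_set_add {α β : Type} [BEq α] (f : β → α) (xs : List β) (s : PySem.Set α) :
    xs.foldl (fun s x => PySem.Set.add s (f x)) s = PySem.Set.update s (xs.map f) :=
  (PySem.Set.update_map_eq_foldl_add xs f s).symm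

theorem foldl_update {α β : Type} [BEq α] (g : β → List α) :
    ∀ (xs : List β) (s : PySem.Set α),
      xs.foldl (fun s x => PySem.Set.update s (g x)) s = PySem.Set.update s (xs.flatMap g) := by
  intro xs
  induction xs with
  | nil => intro s; simp [List.flatMap]
  | cons x xs ih => intro s; rw [List.foldl_cons, ih, List.flatMap_cons, PySem.Set.update_append]

theorem portA_eq (p : String) :
    countBurtalWay p =
      ((PySem.Set.ofList (p.toList :: (pairsN p.toList.length).map
        (fun q => revN p.toList q.1 q.2))).length : Int) := by
  show PySem.Set.len _ = _
  generalize p.toList = l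
  have hn : PySem.List.len l = (l.length : Int) := by simp [PySem.List.len]
  rw [hn, PySem.List.pyRange_one 0 (l.length : Int)]
  simp only [Int.sub_zero, Int.toNat_natCast, List.foldl_map]
  -- rewrite inner folds into Set.update of mapped lists
  have hbody : (fun (dis : PySem.Set (List Char)) (k : Nat) =>
      (PySem.List.pyRange ((0 : Int) + (k : Int) + 1) (l.length : Int) 1).foldl
        (fun dis j =>
          PySem.Set.add dis
            (PySem.List.slice l none (some ((0 : Int) + (k : Int))) ++
              ((PySem.List.slice? (PySem.List.slice l (some ((0 : Int) + (k : Int))) (some (j + 1))) none none (-1)).getD []) ++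
              PySem.List.slice l (some (j + 1)) none)) dis)
      = (fun (dis : PySem.Set (List Char)) (k : Nat) =>
          PySem.Set.update dis (((List.range (l.length - (k + 1))).map (fun m => (k, k + 1 + m))).map
            (fun q => revN l q.1 q.2))) := by
    funext dis k
    rw [PySem.List.pyRange_one]
    have ht : ((l.length : Int) - ((0 : Int) + (k : Int) + 1)).toNat = l.length - (k + 1) := by omega
    rw [ht, List.foldl_map]
    have hstep : (fun (dis : PySem.Set (List Char)) (m : Nat) =>
        PySem.Set.add dis
          (PySem.List.slice l none (some ((0 : Int) + (k : Int))) ++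
            ((PySem.List.slice? (PySem.List.slice l (some ((0 : Int) + (k : Int))) (some ((0 : Int) + (k : Int) + 1 + (m : Int) + 1))) none none (-1)).getD []) ++
            PySem.List.slice l (some ((0 : Int) + (k : Int) + 1 + (m : Int) + 1)) none))
        = (fun (dis : PySem.Set (List Char)) (m : Nat) => PySem.Set.add dis (revN l k (k + 1 + m))) := by
      funext dis m
      have h1 : (0:Int) + (k:Int) = ((k : Nat) : Int) := by ring
      have h2 : (k:Int) + 1 + (m:Int) + 1 = (((k + 1 + m + 1 : Nat)) : Int) := by push_cast; ring
      rw [h1, h2, PySem.List.slice_to_natCast, PySem.List.slice_natCast,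
        PySem.List.slice_from_natCast, PySem.List.slice?_none_none_neg_one]
      rfl
    rw [hstep, foldl_set_add (fun m => revN l k (k + 1 + m))]
    congr 1
    rw [List.map_map]
    rfl
  rw [hbody, foldl_update]
  have hflat : ((List.range l.length).flatMap (fun k =>
      ((List.range (l.length - (k + 1))).map (fun m => (k, k + 1 + m))).map
        (fun q => revN l q.1 q.2)))
      = (pairsN l.length).map (fun q => revN l q.1 q.2) := by
    rw [pairsN, List.map_flatMap]
  rw [hflat]
  have h0 : (PySem.Set.add PySem.Set.empty l : PySem.Set (List Char)) = PySem.Set.ofList [l] := rfl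
  rw [h0, ← PySem.Set.ofList_append]
  simp only [List.singleton_append, PySem.Set.len]

theorem ofList_len_card {α : Type} [BEq α] [LawfulBEq α] [DecidableEq α] (xs : List α) :
    ((PySem.Set.ofList xs).length : Int) = (xs.toFinset.card : Int) := by
  congr 1
  have h1 : (PySem.Set.ofList xs).toFinset = xs.toFinset := by
    apply Finset.ext
    intro a
    simp [List.mem_toFinset, PySem.Set.mem_ofList]
  rw [← List.toFinset_card_of_nodup (PySem.Set.nodup_ofList xs), h1]

theorem main_count (l : List Char) :
    ((PySem.Set.ofList (l :: (pairsN l.length).map (fun q => revN l q.1 q.2))).length : Int)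
      = 1 + (((pairsN l.length).filter (goodP l)).length : Int) := by
  rw [ofList_len_card]
  set D := (pairsN l.length).filter (goodP l) with hD
  -- Finset equality
  have hfs : (l :: (pairsN l.length).map (fun q => revN l q.1 q.2)).toFinset
      = (l :: D.map (fun q => revN l q.1 q.2)).toFinset := by
    apply Finset.ext
    intro x
    simp only [List.mem_toFinset, List.mem_cons, List.mem_map]
    constructor
    · rintro (rfl | ⟨q, hq, rfl⟩)
      · exact Or.inl rfl
      · obtain ⟨hq1, hq2⟩ := mem_pairsN.mp hq
        rcases revN_core (q.2 - q.1) q.1 q.2 (by omega) hq2 le_rfl with h | ⟨a, b, h1, h2, h3, h4, h5⟩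
        · exact Or.inl h
        · right
          refine ⟨(a, b), ?_, h5.symm ▸ rfl⟩
          rw [hD, List.mem_filter]
          exact ⟨mem_pairsN.mpr ⟨h2, by omega⟩, by simpa [goodP] using h4⟩
    · rintro (rfl | ⟨q, hq, rfl⟩)
      · exact Or.inl rfl
      · right
        rw [hD, List.mem_filter] at hq
        exact ⟨q, hq.1, rfl⟩
  rw [hfs]
  -- Nodup of the canonical list
  have hDmem : ∀ q ∈ D, q.1 < q.2 ∧ q.2 < l.length ∧ l.getD q.1 ' ' ≠ l.getD q.2 ' ' := by
    intro q hq
    rw [hD, List.mem_filter] at hq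
    obtain ⟨h1, h2⟩ := mem_pairsN.mp hq.1
    exact ⟨h1, h2, by simpa [goodP] using hq.2⟩
  have hnodup : (l :: D.map (fun q => revN l q.1 q.2)).Nodup := by
    rw [List.nodup_cons]
    constructor
    · intro hmem
      obtain ⟨q, hq, hql⟩ := List.mem_map.mp hmem
      obtain ⟨h1, h2, h3⟩ := hDmem q hq
      exact revN_ne h1 h2 h3 hql
    · apply List.Nodup.map_on
      · intro x hx y hy hxy
        by_contra hne
        obtain ⟨hx1, hx2, hx3⟩ := hDmem x hx
        obtain ⟨hy1, hy2, hy3⟩ := hDmem y hy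
        exact revN_inj hx1 hx2 hy1 hy2 hx3 hy3
          (by simpa [Prod.ext_iff] using hne) hxy
      · exact (nodup_pairsN l.length).filter _
  rw [List.toFinset_card_of_nodup hnodup]
  simp
  omega

-- ===== VERDICT (by name: the statement is the Claim_ definition above) =====
theorem countBurtalWay_spec : Claim_equal_countBurtalWay := by
  intro p _
  unfold Spec_countBurtalWay
  rw [portA_eq, portB_eq, main_count]
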